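-- pv_equiv track=rewrite | github.com/GitMonsters/octotetrahedral-agi | core/primitives.py | p_outline
-- ===== SOURCE A (Python) =====
-- from typing import List, Dict, Tuple, Optional, Callable, Any, Set
-- from collections import Counter
--
-- Grid = List[List[int]]
--
-- def p_outline(grid: Grid) -> Grid:
--     """Keep only border cells of each object (hollow out)."""
--     bg = _bg(grid)
--     rows, cols = len(grid), len(grid[0])
--     result = [[bg]*cols for _ in range(rows)]
--     for r in range(rows):
--         for c in range(cols):
--             if grid[r][c] != bg:
--                 is_border = False
--                 for dr, dc in [(-1,0),(1,0),(0,-1),(0,1)]: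
--                     nr, nc = r+dr, c+dc
--                     if nr < 0 or nr >= rows or nc < 0 or nc >= cols or grid[nr][nc] != grid[r][c]:
--                         is_border = True
--                         break
--                 if is_border:
--                     result[r][c] = grid[r][c]
--     return result
--
-- def _bg(grid: Grid) -> int:
--     counts = Counter(c for row in grid for c in row)
--     return counts.most_common(1)[0][0] if counts else 0
-- ===== SOURCE B (Python) =====
-- from collections import Counter
--
-- def _bg(grid):
--     counts = Counter(c for row in grid for c in row)
--     return counts.most_common(1)[0][0] if counts else 0
--
-- def p_outline(grid):
--     """Hollow out objects: bg-filled canvas, then mark outer-boundary cells and,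
--     scanning each horizontal/vertical adjacency once, both sides of every
--     differing pair."""
--     bg = _bg(grid)
--     rows, cols = len(grid), len(grid[0])
--     result = [[bg] * cols for _ in range(rows)]
--
--     def keep(r, c):
--         v = grid[r][c]
--         if v != bg:
--             result[r][c] = v
--
--     # cells on the outer boundary of the grid
--     for c in range(cols):
--         keep(0, c)
--         keep(rows - 1, c)
--     if cols:
--         for r in range(rows):
--             keep(r, 0)
--             keep(r, cols - 1)
--     # each horizontal adjacency, examined once
--     for r in range(rows):
--         for c in range(cols - 1):
--             if grid[r][c] != grid[r][c + 1]:
--                 keep(r, c)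
--                 keep(r, c + 1)
--     # each vertical adjacency, examined once
--     for r in range(rows - 1):
--         for c in range(cols):
--             if grid[r][c] != grid[r + 1][c]:
--                 keep(r, c)
--                 keep(r + 1, c)
--     return result
-- ===== Notes on version B (the rewrite author's own statement) =====
-- stated objective: alternative
-- what changed: Instead of testing each non-bg cell against its four neighbours with bounds checks, B marks outer-boundary cells directly and then scans every horizontal and vertical adjacency exactly once, marking both sides of each differing pair.
import Mathlib
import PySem

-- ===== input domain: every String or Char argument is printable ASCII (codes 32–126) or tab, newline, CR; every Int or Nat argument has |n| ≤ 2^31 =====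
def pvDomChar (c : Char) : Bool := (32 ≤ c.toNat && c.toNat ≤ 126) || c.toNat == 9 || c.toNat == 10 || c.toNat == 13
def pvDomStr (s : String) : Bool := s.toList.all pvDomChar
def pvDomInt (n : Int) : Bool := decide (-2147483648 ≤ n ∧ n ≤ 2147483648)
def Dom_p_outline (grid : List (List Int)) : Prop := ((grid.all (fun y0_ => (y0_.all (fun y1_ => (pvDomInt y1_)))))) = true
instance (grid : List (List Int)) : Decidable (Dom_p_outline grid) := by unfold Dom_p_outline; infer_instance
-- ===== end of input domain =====

-- B keeps the same border set as A but finds it by a different decomposition: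
-- mark outer-boundary cells, then scan each horizontal/vertical adjacency once,
-- marking both sides of every differing pair (objective: alternative algorithm).

-- ===== PORT A =====

-- grid[r][c] (total form; every use is guarded in range by Pre_)
def pvCell (g : List (List Int)) (r c : Int) : Int :=
  PySem.List.pyGetD (PySem.List.pyGetD g r []) c 0

-- result[r][c] = v
def pvSet (res : List (List Int)) (r c : Int) (v : Int) : List (List Int) :=
  PySem.List.pySetD res r (PySem.List.pySetD (PySem.List.pyGetD res r []) c v)

-- _bg: Counter(...).most_common(1)[0][0] if counts else 0  (shared verbatim by Source A and Source B)
def pvBg (grid : List (List Int)) : Int :=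
  let counts := PySem.Dict.counter (grid.flatMap (fun row => row))
  match PySem.List.max? counts.items (fun kv => kv.2) with
  | some kv => kv.1
  | none => 0

def p_outline (grid : List (List Int)) : List (List Int) :=
  let bg := pvBg grid
  let rows : Int := grid.length
  let cols : Int := (PySem.List.pyGetD grid 0 []).length
  -- [[bg]*cols for _ in range(rows)]  (cols ≥ 0, so replicate is exact)
  let result := (PySem.List.pyRange 0 rows 1).map (fun _ => List.replicate cols.toNat bg)
  (PySem.List.pyRange 0 rows 1).foldl (fun res r =>
    (PySem.List.pyRange 0 cols 1).foldl (fun res c =>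
      if pvCell grid r c ≠ bg then
        -- the dr/dc loop sets is_border at the first hit and breaks: List.any
        let isBorder := [((-1 : Int), (0 : Int)), (1, 0), (0, -1), (0, 1)].any (fun d =>
          decide (r + d.1 < 0) || decide (r + d.1 ≥ rows) ||
          decide (c + d.2 < 0) || decide (c + d.2 ≥ cols) ||
          decide (pvCell grid (r + d.1) (c + d.2) ≠ pvCell grid r c))
        if isBorder then pvSet res r c (pvCell grid r c) else res
      else res) res) result

-- ===== PORT B =====

def p_outline_alt (grid : List (List Int)) : List (List Int) :=
  let bg := pvBg grid
  let rows : Int := grid.length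
  let cols : Int := (PySem.List.pyGetD grid 0 []).length
  let keep := fun (res : List (List Int)) (r c : Int) =>
    if pvCell grid r c ≠ bg then pvSet res r c (pvCell grid r c) else res
  let result := (PySem.List.pyRange 0 rows 1).map (fun _ => List.replicate cols.toNat bg)
  -- cells on the outer boundary of the grid
  let result := (PySem.List.pyRange 0 cols 1).foldl (fun res c =>
    keep (keep res 0 c) (rows - 1) c) result
  let result := if cols ≠ 0 then
      (PySem.List.pyRange 0 rows 1).foldl (fun res r =>
        keep (keep res r 0) r (cols - 1)) result
    else result
  -- each horizontal adjacency, examined once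
  let result := (PySem.List.pyRange 0 rows 1).foldl (fun res r =>
    (PySem.List.pyRange 0 (cols - 1) 1).foldl (fun res c =>
      if pvCell grid r c ≠ pvCell grid r (c + 1) then
        keep (keep res r c) r (c + 1)
      else res) res) result
  -- each vertical adjacency, examined once
  (PySem.List.pyRange 0 (rows - 1) 1).foldl (fun res r =>
    (PySem.List.pyRange 0 cols 1).foldl (fun res c =>
      if pvCell grid r c ≠ pvCell grid (r + 1) c then
        keep (keep res r c) (r + 1) c
      else res) res) result

-- ===== PRECONDITION & SPEC =====

-- Pre_ excludes exactly the inputs on which A raises IndexError: the empty grid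
-- (grid[0]) and ragged grids with a row shorter than row 0 (grid[r][c]).
def Pre_p_outline (grid : List (List Int)) : Prop :=
  grid ≠ [] ∧ ∀ row ∈ grid, grid.headI.length ≤ row.length
instance (grid : List (List Int)) : Decidable (Pre_p_outline grid) := by unfold Pre_p_outline; infer_instance

def pvWitness_p_outline : List (List Int) := [[0, 0, 0], [0, 1, 0], [0, 0, 0]]

def Spec_p_outline (grid : List (List Int)) (out : List (List Int)) : Prop := out = p_outline_alt grid
instance (grid : List (List Int)) (out : List (List Int)) : Decidable (Spec_p_outline grid out) := by unfold Spec_p_outline; infer_instance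

-- ===== CLAIM (what is proved, stated in full; the proofs are below) =====
def Claim_equal_p_outline : Prop := ∀ (grid : List (List Int)), Dom_p_outline grid → Pre_p_outline grid → Spec_p_outline grid (p_outline grid)

-- ===== LEMMAS AND PROOFS =====

-- shape invariant: n rows, each of length m
def pvShape (n m : Nat) (res : List (List Int)) : Prop :=
  res.length = n ∧ ∀ row ∈ res, row.length = m

lemma pvGetD_nonneg {α : Type} (xs : List α) (i : Int) (d : α) (hi : 0 ≤ i) :
    PySem.List.pyGetD xs i d = xs.getD i.toNat d := by
  rw [← Int.toNat_of_nonneg hi, PySem.List.pyGetD_natCast]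
  have : (max i 0).toNat = i.toNat := by omega
  simp [this]

lemma pvSet_eq (res : List (List Int)) (r c : Int) (v : Int) (hr : 0 ≤ r) (hc : 0 ≤ c) :
    pvSet res r c v = res.set r.toNat ((res.getD r.toNat []).set c.toNat v) := by
  unfold pvSet
  rw [PySem.List.pySetD_of_nonneg _ _ hr, PySem.List.pySetD_of_nonneg _ _ hc, pvGetD_nonneg _ _ _ hr]

lemma pvCell_eq (res : List (List Int)) (i j : Int) (hi : 0 ≤ i) (hj : 0 ≤ j) :
    pvCell res i j = (res.getD i.toNat []).getD j.toNat 0 := by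
  unfold pvCell
  rw [pvGetD_nonneg _ _ _ hi, pvGetD_nonneg _ _ _ hj]

lemma pvShape_pvSet {n m : Nat} {res : List (List Int)} (h : pvShape n m res)
    {r c : Int} (v : Int) (hr : 0 ≤ r) (hrn : r < (n : Int)) (hc : 0 ≤ c) :
    pvShape n m (pvSet res r c v) := by
  rw [pvSet_eq _ _ _ _ hr hc]
  obtain ⟨h1, h2⟩ := h
  have hrN : r.toNat < res.length := by omega
  refine ⟨by simpa using h1, ?_⟩
  intro row hrow
  rcases List.mem_or_eq_of_mem_set hrow with h' | h'
  · exact h2 _ h'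
  · subst h'
    rw [List.length_set, List.getD_eq_getElem _ _ hrN]
    exact h2 _ (List.getElem_mem hrN)

lemma pvCell_pvSet {n m : Nat} {res : List (List Int)} (h : pvShape n m res)
    {r c i j : Int} (v : Int)
    (hr : 0 ≤ r) (hrn : r < (n : Int)) (hc : 0 ≤ c) (hcm : c < (m : Int))
    (hi : 0 ≤ i) (hin : i < (n : Int)) (hj : 0 ≤ j) (hjm : j < (m : Int)) :
    pvCell (pvSet res r c v) i j = if r = i ∧ c = j then v else pvCell res i j := by
  obtain ⟨h1, h2⟩ := h
  have hrN : r.toNat < res.length := by omega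
  have hiN : i.toNat < res.length := by omega
  have hrowr : (res.getD r.toNat []).length = m := by
    rw [List.getD_eq_getElem _ _ hrN]; exact h2 _ (List.getElem_mem hrN)
  rw [pvSet_eq _ _ _ _ hr hc, pvCell_eq _ _ _ hi hj, pvCell_eq _ _ _ hi hj,
    List.getD_eq_getElem?_getD (l := res.set _ _), List.getD_eq_getElem?_getD (l := res) (i := i.toNat)]
  by_cases hri : r = i
  · subst hri
    rw [List.getElem?_set_self hrN]
    by_cases hcj : c = j
    · subst hcj
      have : c.toNat < (res.getD r.toNat []).length := by omega
      rw [if_pos ⟨rfl, rfl⟩]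
      simp only [Option.getD_some]
      rw [List.getD_eq_getElem?_getD, List.getElem?_set_self this]
      rfl
    · have hne : c.toNat ≠ j.toNat := by omega
      rw [if_neg (by tauto)]
      simp only [Option.getD_some]
      rw [List.getD_eq_getElem?_getD, List.getElem?_set_ne hne, ← List.getD_eq_getElem?_getD,
        ← List.getD_eq_getElem?_getD]
  · have hne : r.toNat ≠ i.toNat := by omega
    rw [if_neg (by tauto), List.getElem?_set_ne hne]

lemma pvFold_shape {n m : Nat} (L : List Int) (step : List (List Int) → Int → List (List Int))
    (hstep : ∀ res x, x ∈ L → pvShape n m res → pvShape n m (step res x)) :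
    ∀ res, pvShape n m res → pvShape n m (L.foldl step res) := by
  induction L with
  | nil => intro res h; simpa using h
  | cons a L ih =>
    intro res h
    simpa using ih (fun res x hx => hstep res x (by simp [hx])) _ (hstep res a (by simp) h)

lemma pvFold_at {n m : Nat} (L : List Int) (step : List (List Int) → Int → List (List Int))
    (i j : Int) (p : Int → Bool) (w : Int)
    (hstep : ∀ res x, x ∈ L → pvShape n m res →
       pvShape n m (step res x) ∧ pvCell (step res x) i j = (if p x then w else pvCell res i j)) :
    ∀ res, pvShape n m res →
      pvShape n m (L.foldl step res) ∧
      pvCell (L.foldl step res) i j = (if L.any p then w else pvCell res i j) := by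
  induction L with
  | nil => intro res h; simpa using h
  | cons a L ih =>
    intro res h
    obtain ⟨h1, h2⟩ := hstep res a (by simp) h
    obtain ⟨h3, h4⟩ := ih (fun res x hx => hstep res x (by simp [hx])) _ h1
    refine ⟨by simpa using h3, ?_⟩
    simp only [List.foldl_cons, List.any_cons]
    rw [h4, h2]
    by_cases hpa : p a = true <;> by_cases hL : L.any p = true <;> simp [hpa, hL]

lemma pvInit_shape (n m : Nat) (bg : Int) :
    pvShape n m ((PySem.List.pyRange 0 (n : Int) 1).map (fun _ => List.replicate m bg)) := by
  constructor
  · simp [PySem.List.length_pyRange_one]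
  · intro row hrow
    simp only [List.mem_map] at hrow
    obtain ⟨_, _, hrow⟩ := hrow
    simp [← hrow]

lemma pvInit_cell (n m : Nat) (bg : Int) {i j : Int}
    (hi : 0 ≤ i) (hin : i < (n : Int)) (hj : 0 ≤ j) (hjm : j < (m : Int)) :
    pvCell ((PySem.List.pyRange 0 (n : Int) 1).map (fun _ => List.replicate m bg)) i j = bg := by
  rw [pvCell_eq _ _ _ hi hj]
  have h1 : i.toNat < ((PySem.List.pyRange 0 (n : Int) 1).map (fun _ => List.replicate m bg)).length := by
    simp [PySem.List.length_pyRange_one]; omega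
  rw [List.getD_eq_getElem _ _ h1]
  have h2 : j.toNat < m := by omega
  simp [List.getD_eq_getElem?_getD, h2]

lemma pvKeep_shape {n m : Nat} {res : List (List Int)} (g : List (List Int)) (bg : Int)
    (h : pvShape n m res) {r c : Int} (hr : 0 ≤ r) (hrn : r < (n : Int)) (hc : 0 ≤ c) :
    pvShape n m (if pvCell g r c ≠ bg then pvSet res r c (pvCell g r c) else res) := by
  split_ifs with h'
  · exact pvShape_pvSet h _ hr hrn hc
  · exact h

lemma pvKeep_cell {n m : Nat} {res : List (List Int)} (g : List (List Int)) (bg : Int)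
    (h : pvShape n m res) {r c i j : Int}
    (hr : 0 ≤ r) (hrn : r < (n : Int)) (hc : 0 ≤ c) (hcm : c < (m : Int))
    (hi : 0 ≤ i) (hin : i < (n : Int)) (hj : 0 ≤ j) (hjm : j < (m : Int)) :
    pvCell (if pvCell g r c ≠ bg then pvSet res r c (pvCell g r c) else res) i j
      = if (decide (r = i ∧ c = j) && decide (pvCell g r c ≠ bg)) then pvCell g i j
        else pvCell res i j := by
  by_cases h' : pvCell g r c ≠ bg
  · rw [if_pos h', pvCell_pvSet h _ hr hrn hc hcm hi hin hj hjm]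
    by_cases hij : r = i ∧ c = j
    · obtain ⟨e1, e2⟩ := hij; subst e1; subst e2; simp [h']
    · simp [hij]
  · rw [if_neg h']
    simp [h']

-- the per-cell border test of A, at point (r, c)
def pvCondA (g : List (List Int)) (bg : Int) (n m r c : Int) : Bool :=
  decide (pvCell g r c ≠ bg) &&
    ([((-1 : Int), (0 : Int)), (1, 0), (0, -1), (0, 1)].any (fun d =>
      decide (r + d.1 < 0) || decide (r + d.1 ≥ n) ||
      decide (c + d.2 < 0) || decide (c + d.2 ≥ m) ||
      decide (pvCell g (r + d.1) (c + d.2) ≠ pvCell g r c)))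

lemma any_point (n m i j : Int) (q : Int → Int → Bool)
    (hi : 0 ≤ i) (hin : i < n) (hj : 0 ≤ j) (hjm : j < m) :
    ((PySem.List.pyRange 0 n 1).any fun r =>
      (PySem.List.pyRange 0 m 1).any fun c => decide (r = i ∧ c = j) && q r c) = q i j := by
  cases hq : q i j
  · rw [List.any_eq_false]
    intro r hr
    rw [Bool.not_eq_true, List.any_eq_false]
    intro c hc
    rw [Bool.not_eq_true]
    by_cases hrc : r = i ∧ c = j
    · obtain ⟨e1, e2⟩ := hrc; subst e1; subst e2; simp [hq]
    · simp [hrc]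
  · rw [List.any_eq_true]
    refine ⟨i, PySem.List.mem_pyRange_one.mpr ⟨hi, hin⟩, ?_⟩
    rw [List.any_eq_true]
    exact ⟨j, PySem.List.mem_pyRange_one.mpr ⟨hj, hjm⟩, by simp [hq]⟩

lemma charA (grid : List (List Int)) (_hne : grid ≠ []) :
    pvShape grid.length (PySem.List.pyGetD grid 0 []).length (p_outline grid) ∧
    ∀ i j : Int, 0 ≤ i → i < (grid.length : Int) → 0 ≤ j →
      j < ((PySem.List.pyGetD grid 0 []).length : Int) →
      pvCell (p_outline grid) i j =
        if pvCondA grid (pvBg grid) (grid.length : Int) ((PySem.List.pyGetD grid 0 []).length : Int) i j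
        then pvCell grid i j else pvBg grid := by
  constructor
  · simp only [p_outline, Int.toNat_natCast]
    refine pvFold_shape _ _ ?_ _
      (pvInit_shape grid.length (PySem.List.pyGetD grid 0 []).length (pvBg grid))
    intro res r hr hres
    obtain ⟨hr0, hrn⟩ := PySem.List.mem_pyRange_one.mp hr
    refine pvFold_shape _ _ ?_ res hres
    intro res' c hc hres'
    obtain ⟨hc0, hcm⟩ := PySem.List.mem_pyRange_one.mp hc
    split_ifs with h1 h2
    · exact pvShape_pvSet hres' _ hr0 hrn hc0
    · exact hres'
    · exact hres'
  · intro i j hi hin hj hjm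
    simp only [p_outline, Int.toNat_natCast]
    refine Eq.trans ((pvFold_at _ _ i j
        (fun r => (PySem.List.pyRange 0 ((PySem.List.pyGetD grid 0 []).length : Int) 1).any
          (fun c => decide (r = i ∧ c = j) &&
            pvCondA grid (pvBg grid) (grid.length : Int) ((PySem.List.pyGetD grid 0 []).length : Int) r c))
        (pvCell grid i j) ?_ _
        (pvInit_shape grid.length (PySem.List.pyGetD grid 0 []).length (pvBg grid))).2) ?_
    · intro res r hr hres
      obtain ⟨hr0, hrn⟩ := PySem.List.mem_pyRange_one.mp hr
      refine (pvFold_at _ _ i j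
        (fun c => decide (r = i ∧ c = j) &&
          pvCondA grid (pvBg grid) (grid.length : Int) ((PySem.List.pyGetD grid 0 []).length : Int) r c)
        (pvCell grid i j) ?_ res hres)
      intro res' c hc hres'
      obtain ⟨hc0, hcm⟩ := PySem.List.mem_pyRange_one.mp hc
      constructor
      · split_ifs with h1 h2
        · exact pvShape_pvSet hres' _ hr0 hrn hc0
        · exact hres'
        · exact hres'
      · simp only [pvCondA]
        split_ifs with h1 h2 h3 h3 h3 <;>
        first
        | rfl
        | (rw [pvCell_pvSet hres' _ hr0 hrn hc0 hcm hi hin hj hjm]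
           rw [Bool.and_eq_true] at h3
           obtain ⟨ha, -⟩ := h3
           obtain ⟨e1, e2⟩ := of_decide_eq_true ha
           subst e1; subst e2; simp)
        | (rw [pvCell_pvSet hres' _ hr0 hrn hc0 hcm hi hin hj hjm]
           rw [if_neg]
           intro hcon
           obtain ⟨e1, e2⟩ := hcon
           apply h3
           subst e1; subst e2
           rw [h2]
           simp [h1])
        | (exfalso
           rw [Bool.and_eq_true, Bool.and_eq_true] at h3
           obtain ⟨-, hb1, hb2⟩ := h3
           first
           | exact h2 hb2
           | exact absurd (of_decide_eq_true hb1) h1)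
    · rw [pvInit_cell grid.length (PySem.List.pyGetD grid 0 []).length (pvBg grid) hi hin hj hjm,
        any_point _ _ i j _ hi hin hj hjm]

lemma pvKeep2_shape {n m : Nat} {res : List (List Int)} (g : List (List Int)) (bg : Int)
    (h : pvShape n m res) {r1 c1 r2 c2 : Int}
    (hr1 : 0 ≤ r1) (hrn1 : r1 < (n : Int)) (hc1 : 0 ≤ c1)
    (hr2 : 0 ≤ r2) (hrn2 : r2 < (n : Int)) (hc2 : 0 ≤ c2) :
    pvShape n m (if pvCell g r2 c2 ≠ bg then
        pvSet (if pvCell g r1 c1 ≠ bg then pvSet res r1 c1 (pvCell g r1 c1) else res) r2 c2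
          (pvCell g r2 c2)
      else if pvCell g r1 c1 ≠ bg then pvSet res r1 c1 (pvCell g r1 c1) else res) :=
  pvKeep_shape g bg (pvKeep_shape g bg h hr1 hrn1 hc1) hr2 hrn2 hc2

lemma pvKeep2_cell {n m : Nat} {res : List (List Int)} (g : List (List Int)) (bg : Int)
    (h : pvShape n m res) {r1 c1 r2 c2 i j : Int}
    (hr1 : 0 ≤ r1) (hrn1 : r1 < (n : Int)) (hc1 : 0 ≤ c1) (hcm1 : c1 < (m : Int))
    (hr2 : 0 ≤ r2) (hrn2 : r2 < (n : Int)) (hc2 : 0 ≤ c2) (hcm2 : c2 < (m : Int))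
    (hi : 0 ≤ i) (hin : i < (n : Int)) (hj : 0 ≤ j) (hjm : j < (m : Int)) :
    pvCell (if pvCell g r2 c2 ≠ bg then
        pvSet (if pvCell g r1 c1 ≠ bg then pvSet res r1 c1 (pvCell g r1 c1) else res) r2 c2
          (pvCell g r2 c2)
      else if pvCell g r1 c1 ≠ bg then pvSet res r1 c1 (pvCell g r1 c1) else res) i j
    = if ((decide (r1 = i ∧ c1 = j) && decide (pvCell g r1 c1 ≠ bg)) ||
          (decide (r2 = i ∧ c2 = j) && decide (pvCell g r2 c2 ≠ bg))) then pvCell g i j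
      else pvCell res i j := by
  rw [pvKeep_cell g bg (pvKeep_shape g bg h hr1 hrn1 hc1) hr2 hrn2 hc2 hcm2 hi hin hj hjm,
    pvKeep_cell g bg h hr1 hrn1 hc1 hcm1 hi hin hj hjm]
  simp only [Bool.and_eq_true, Bool.or_eq_true, decide_eq_true_eq]
  split_ifs <;> tauto

lemma pvIf4_or (a b c d : Bool) (w x : Int) :
    (if d then w else if c then w else if b then w else if a then w else x)
      = (if (a || b || c || d) then w else x) := by
  cases a <;> cases b <;> cases c <;> cases d <;> simp

-- the union of B's four marking passes, evaluated at point (i, j)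
def pvCondB (g : List (List Int)) (bg : Int) (n m i j : Int) : Bool :=
  ((PySem.List.pyRange 0 m 1).any fun c =>
      (decide ((0 : Int) = i ∧ c = j) && decide (pvCell g 0 c ≠ bg)) ||
      (decide (n - 1 = i ∧ c = j) && decide (pvCell g (n - 1) c ≠ bg))) ||
  ((PySem.List.pyRange 0 n 1).any fun r =>
      (decide (r = i ∧ (0 : Int) = j) && decide (pvCell g r 0 ≠ bg)) ||
      (decide (r = i ∧ m - 1 = j) && decide (pvCell g r (m - 1) ≠ bg))) ||
  ((PySem.List.pyRange 0 n 1).any fun r => (PySem.List.pyRange 0 (m - 1) 1).any fun c =>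
      decide (pvCell g r c ≠ pvCell g r (c + 1)) &&
        ((decide (r = i ∧ c = j) && decide (pvCell g r c ≠ bg)) ||
         (decide (r = i ∧ c + 1 = j) && decide (pvCell g r (c + 1) ≠ bg)))) ||
  ((PySem.List.pyRange 0 (n - 1) 1).any fun r => (PySem.List.pyRange 0 m 1).any fun c =>
      decide (pvCell g r c ≠ pvCell g (r + 1) c) &&
        ((decide (r = i ∧ c = j) && decide (pvCell g r c ≠ bg)) ||
         (decide (r + 1 = i ∧ c = j) && decide (pvCell g (r + 1) c ≠ bg))))

lemma charB (grid : List (List Int)) (hne : grid ≠ []) :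
    pvShape grid.length (PySem.List.pyGetD grid 0 []).length (p_outline_alt grid) ∧
    ∀ i j : Int, 0 ≤ i → i < (grid.length : Int) → 0 ≤ j →
      j < ((PySem.List.pyGetD grid 0 []).length : Int) →
      pvCell (p_outline_alt grid) i j =
        if pvCondB grid (pvBg grid) (grid.length : Int) ((PySem.List.pyGetD grid 0 []).length : Int) i j
        then pvCell grid i j else pvBg grid := by
  have hn0 : 0 < grid.length := List.length_pos_iff.mpr hne
  constructor
  · simp only [p_outline_alt, Int.toNat_natCast]
    refine pvFold_shape _ _ ?_ _ (pvFold_shape _ _ ?_ _ ?_)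
    · -- vertical-pair pass preserves the shape
      intro res r hr hres
      obtain ⟨hr0, hrn⟩ := PySem.List.mem_pyRange_one.mp hr
      refine pvFold_shape _ _ ?_ res hres
      intro res' c hc hres'
      obtain ⟨hc0, hcm⟩ := PySem.List.mem_pyRange_one.mp hc
      by_cases hd : pvCell grid r c ≠ pvCell grid (r + 1) c
      · rw [if_pos hd]
        exact pvKeep2_shape grid (pvBg grid) hres' hr0 (by omega) hc0 (by omega) (by omega) hc0
      · rw [if_neg hd]; exact hres'
    · -- horizontal-pair pass preserves the shape
      intro res r hr hres
      obtain ⟨hr0, hrn⟩ := PySem.List.mem_pyRange_one.mp hr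
      refine pvFold_shape _ _ ?_ res hres
      intro res' c hc hres'
      obtain ⟨hc0, hcm⟩ := PySem.List.mem_pyRange_one.mp hc
      by_cases hd : pvCell grid r c ≠ pvCell grid r (c + 1)
      · rw [if_pos hd]
        exact pvKeep2_shape grid (pvBg grid) hres' hr0 hrn hc0 hr0 hrn (by omega)
      · rw [if_neg hd]; exact hres'
    · -- boundary passes (under the cols ≠ 0 guard) preserve the shape
      split_ifs with hm0
      · refine pvFold_shape _ _ ?_ _ (pvFold_shape _ _ ?_ _ (pvInit_shape _ _ _))
        · intro res r hr hres
          obtain ⟨hr0, hrn⟩ := PySem.List.mem_pyRange_one.mp hr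
          exact pvKeep2_shape grid (pvBg grid) hres hr0 hrn (by omega) hr0 hrn (by omega)
        · intro res c hc hres
          obtain ⟨hc0, hcm⟩ := PySem.List.mem_pyRange_one.mp hc
          exact pvKeep2_shape grid (pvBg grid) hres (by omega) (by omega) hc0
            (by omega) (by omega) hc0
      · refine pvFold_shape _ _ ?_ _ (pvInit_shape _ _ _)
        intro res c hc hres
        obtain ⟨hc0, hcm⟩ := PySem.List.mem_pyRange_one.mp hc
        exact pvKeep2_shape grid (pvBg grid) hres (by omega) (by omega) hc0
          (by omega) (by omega) hc0
  · intro i j hi hin hj hjm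
    have hm1 : (1 : Int) ≤ ((PySem.List.pyGetD grid 0 []).length : Int) := by omega
    simp only [p_outline_alt, Int.toNat_natCast]
    rw [if_pos (show (((PySem.List.pyGetD grid 0 []).length : Int)) ≠ 0 by omega)]
    have pass1 := pvFold_at (n := grid.length) (m := (PySem.List.pyGetD grid 0 []).length)
      (PySem.List.pyRange 0 ((PySem.List.pyGetD grid 0 []).length : Int))
      (fun res c =>
        if pvCell grid (↑grid.length - 1) c ≠ pvBg grid then
          pvSet (if pvCell grid 0 c ≠ pvBg grid then pvSet res 0 c (pvCell grid 0 c) else res)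
            (↑grid.length - 1) c (pvCell grid (↑grid.length - 1) c)
        else if pvCell grid 0 c ≠ pvBg grid then pvSet res 0 c (pvCell grid 0 c) else res)
      i j
      (fun c => (decide ((0 : Int) = i ∧ c = j) && decide (pvCell grid 0 c ≠ pvBg grid)) ||
        (decide ((grid.length : Int) - 1 = i ∧ c = j) &&
          decide (pvCell grid (↑grid.length - 1) c ≠ pvBg grid)))
      (pvCell grid i j)
      (by
        intro res c hc hres
        obtain ⟨hc0, hcm⟩ := PySem.List.mem_pyRange_one.mp hc
        exact ⟨pvKeep2_shape grid (pvBg grid) hres (by omega) (by omega) hc0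
            (by omega) (by omega) hc0,
          pvKeep2_cell grid (pvBg grid) hres (by omega) (by omega) hc0 hcm
            (by omega) (by omega) hc0 hcm hi hin hj hjm⟩)
    obtain ⟨sh1, e1⟩ := pass1 _
      (pvInit_shape grid.length (PySem.List.pyGetD grid 0 []).length (pvBg grid))
    rw [pvInit_cell grid.length (PySem.List.pyGetD grid 0 []).length (pvBg grid) hi hin hj hjm] at e1
    have pass2 := pvFold_at (n := grid.length) (m := (PySem.List.pyGetD grid 0 []).length)
      (PySem.List.pyRange 0 (grid.length : Int))
      (fun res r =>
        if pvCell grid r (↑(PySem.List.pyGetD grid 0 []).length - 1) ≠ pvBg grid then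
          pvSet (if pvCell grid r 0 ≠ pvBg grid then pvSet res r 0 (pvCell grid r 0) else res)
            r (↑(PySem.List.pyGetD grid 0 []).length - 1)
            (pvCell grid r (↑(PySem.List.pyGetD grid 0 []).length - 1))
        else if pvCell grid r 0 ≠ pvBg grid then pvSet res r 0 (pvCell grid r 0) else res)
      i j
      (fun r => (decide (r = i ∧ (0 : Int) = j) && decide (pvCell grid r 0 ≠ pvBg grid)) ||
        (decide (r = i ∧ ((PySem.List.pyGetD grid 0 []).length : Int) - 1 = j) &&
          decide (pvCell grid r (↑(PySem.List.pyGetD grid 0 []).length - 1) ≠ pvBg grid)))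
      (pvCell grid i j)
      (by
        intro res r hr hres
        obtain ⟨hr0, hrn⟩ := PySem.List.mem_pyRange_one.mp hr
        exact ⟨pvKeep2_shape grid (pvBg grid) hres hr0 hrn (by omega) hr0 hrn (by omega),
          pvKeep2_cell grid (pvBg grid) hres hr0 hrn (by omega) (by omega) hr0 hrn
            (by omega) (by omega) hi hin hj hjm⟩)
    obtain ⟨sh2, e2⟩ := pass2 _ sh1
    rw [e1] at e2
    have pass3 := pvFold_at (n := grid.length) (m := (PySem.List.pyGetD grid 0 []).length)
      (PySem.List.pyRange 0 (grid.length : Int))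
      (fun res r =>
        List.foldl
          (fun res c =>
            if pvCell grid r c ≠ pvCell grid r (c + 1) then
              if pvCell grid r (c + 1) ≠ pvBg grid then
                pvSet (if pvCell grid r c ≠ pvBg grid then pvSet res r c (pvCell grid r c) else res)
                  r (c + 1) (pvCell grid r (c + 1))
              else if pvCell grid r c ≠ pvBg grid then pvSet res r c (pvCell grid r c) else res
            else res)
          res (PySem.List.pyRange 0 (((PySem.List.pyGetD grid 0 []).length : Int) - 1)))
      i j
      (fun r => (PySem.List.pyRange 0 (((PySem.List.pyGetD grid 0 []).length : Int) - 1)).any fun c =>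
        decide (pvCell grid r c ≠ pvCell grid r (c + 1)) &&
          ((decide (r = i ∧ c = j) && decide (pvCell grid r c ≠ pvBg grid)) ||
           (decide (r = i ∧ c + 1 = j) && decide (pvCell grid r (c + 1) ≠ pvBg grid))))
      (pvCell grid i j)
      (by
        intro res r hr hres
        obtain ⟨hr0, hrn⟩ := PySem.List.mem_pyRange_one.mp hr
        refine pvFold_at _ _ i j _ (pvCell grid i j) ?_ res hres
        intro res' c hc hres'
        obtain ⟨hc0, hcm⟩ := PySem.List.mem_pyRange_one.mp hc
        constructor
        · by_cases hd : pvCell grid r c ≠ pvCell grid r (c + 1)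
          · rw [if_pos hd]
            exact pvKeep2_shape grid (pvBg grid) hres' hr0 hrn hc0 hr0 hrn (by omega)
          · rw [if_neg hd]; exact hres'
        · by_cases hd : pvCell grid r c ≠ pvCell grid r (c + 1)
          · rw [if_pos hd, pvKeep2_cell grid (pvBg grid) hres' hr0 hrn hc0 (by omega)
              hr0 hrn (by omega) (by omega) hi hin hj hjm]
            simp [hd]
          · rw [if_neg hd]
            simp [hd])
    obtain ⟨sh3, e3⟩ := pass3 _ sh2
    rw [e2] at e3
    have pass4 := pvFold_at (n := grid.length) (m := (PySem.List.pyGetD grid 0 []).length)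
      (PySem.List.pyRange 0 ((grid.length : Int) - 1))
      (fun res r =>
        List.foldl
          (fun res c =>
            if pvCell grid r c ≠ pvCell grid (r + 1) c then
              if pvCell grid (r + 1) c ≠ pvBg grid then
                pvSet (if pvCell grid r c ≠ pvBg grid then pvSet res r c (pvCell grid r c) else res)
                  (r + 1) c (pvCell grid (r + 1) c)
              else if pvCell grid r c ≠ pvBg grid then pvSet res r c (pvCell grid r c) else res
            else res)
          res (PySem.List.pyRange 0 ((PySem.List.pyGetD grid 0 []).length : Int)))
      i j
      (fun r => (PySem.List.pyRange 0 ((PySem.List.pyGetD grid 0 []).length : Int)).any fun c =>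
        decide (pvCell grid r c ≠ pvCell grid (r + 1) c) &&
          ((decide (r = i ∧ c = j) && decide (pvCell grid r c ≠ pvBg grid)) ||
           (decide (r + 1 = i ∧ c = j) && decide (pvCell grid (r + 1) c ≠ pvBg grid))))
      (pvCell grid i j)
      (by
        intro res r hr hres
        obtain ⟨hr0, hrn⟩ := PySem.List.mem_pyRange_one.mp hr
        refine pvFold_at _ _ i j _ (pvCell grid i j) ?_ res hres
        intro res' c hc hres'
        obtain ⟨hc0, hcm⟩ := PySem.List.mem_pyRange_one.mp hc
        constructor
        · by_cases hd : pvCell grid r c ≠ pvCell grid (r + 1) c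
          · rw [if_pos hd]
            exact pvKeep2_shape grid (pvBg grid) hres' hr0 (by omega) hc0 (by omega)
              (by omega) hc0
          · rw [if_neg hd]; exact hres'
        · by_cases hd : pvCell grid r c ≠ pvCell grid (r + 1) c
          · rw [if_pos hd, pvKeep2_cell grid (pvBg grid) hres' hr0 (by omega) hc0 hcm
              (by omega) (by omega) hc0 hcm hi hin hj hjm]
            simp [hd]
          · rw [if_neg hd]
            simp [hd])
    obtain ⟨sh4, e4⟩ := pass4 _ sh3
    rw [e3] at e4
    rw [e4, pvIf4_or]
    simp only [pvCondB]
    rfl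

lemma pvCond_eq (g : List (List Int)) (bg : Int) (n m i j : Int)
    (_hn : 1 ≤ n) (_hm : 1 ≤ m) (hi : 0 ≤ i) (hin : i < n) (hj : 0 ≤ j) (hjm : j < m) :
    pvCondA g bg n m i j = pvCondB g bg n m i j := by
  rw [Bool.eq_iff_iff]
  simp only [pvCondA, pvCondB, List.any_cons, List.any_nil, List.any_eq_true,
    PySem.List.mem_pyRange_one, Bool.or_eq_true, Bool.and_eq_true, decide_eq_true_eq,
    Bool.or_false, add_zero, ← sub_eq_add_neg]
  constructor
  · rintro ⟨hv, (h | h | h | h)⟩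
    · -- up neighbour
      rcases h with ((((h | h) | h) | h) | h)
      · refine Or.inl (Or.inl (Or.inl ⟨j, ⟨hj, hjm⟩, Or.inl ⟨⟨by omega, rfl⟩, ?_⟩⟩))
        rw [show (0 : Int) = i from by omega]; exact hv
      · exact absurd h (by omega)
      · exact absurd h (by omega)
      · exact absurd h (by omega)
      · by_cases hz : i = 0
        · refine Or.inl (Or.inl (Or.inl ⟨j, ⟨hj, hjm⟩, Or.inl ⟨⟨hz.symm, rfl⟩, ?_⟩⟩))
          rw [← hz]; exact hv
        · refine Or.inr ⟨i - 1, ⟨by omega, by omega⟩, j, ⟨hj, hjm⟩, ?_,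
            Or.inr ⟨⟨by omega, rfl⟩, ?_⟩⟩
          · rw [show i - 1 + 1 = i from by omega]; exact h
          · rw [show i - 1 + 1 = i from by omega]; exact hv
    · -- down neighbour
      rcases h with ((((h | h) | h) | h) | h)
      · exact absurd h (by omega)
      · refine Or.inl (Or.inl (Or.inl ⟨j, ⟨hj, hjm⟩, Or.inr ⟨⟨by omega, rfl⟩, ?_⟩⟩))
        rw [show n - 1 = i from by omega]; exact hv
      · exact absurd h (by omega)
      · exact absurd h (by omega)
      · by_cases hz : i = n - 1
        · refine Or.inl (Or.inl (Or.inl ⟨j, ⟨hj, hjm⟩, Or.inr ⟨⟨hz.symm, rfl⟩, ?_⟩⟩))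
          rw [← hz]; exact hv
        · exact Or.inr ⟨i, ⟨hi, by omega⟩, j, ⟨hj, hjm⟩, Ne.symm h,
            Or.inl ⟨⟨rfl, rfl⟩, hv⟩⟩
    · -- left neighbour
      rcases h with ((((h | h) | h) | h) | h)
      · exact absurd h (by omega)
      · exact absurd h (by omega)
      · refine Or.inl (Or.inl (Or.inr ⟨i, ⟨hi, hin⟩, Or.inl ⟨⟨rfl, by omega⟩, ?_⟩⟩))
        rw [show (0 : Int) = j from by omega]; exact hv
      · exact absurd h (by omega)
      · by_cases hz : j = 0
        · refine Or.inl (Or.inl (Or.inr ⟨i, ⟨hi, hin⟩, Or.inl ⟨⟨rfl, hz.symm⟩, ?_⟩⟩))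
          rw [← hz]; exact hv
        · refine Or.inl (Or.inr ⟨i, ⟨hi, hin⟩, j - 1, ⟨by omega, by omega⟩, ?_,
            Or.inr ⟨⟨rfl, by omega⟩, ?_⟩⟩)
          · rw [show j - 1 + 1 = j from by omega]; exact h
          · rw [show j - 1 + 1 = j from by omega]; exact hv
    · -- right neighbour
      rcases h with ((((h | h) | h) | h) | h)
      · exact absurd h (by omega)
      · exact absurd h (by omega)
      · exact absurd h (by omega)
      · refine Or.inl (Or.inl (Or.inr ⟨i, ⟨hi, hin⟩, Or.inr ⟨⟨rfl, by omega⟩, ?_⟩⟩))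
        rw [show m - 1 = j from by omega]; exact hv
      · by_cases hz : j = m - 1
        · refine Or.inl (Or.inl (Or.inr ⟨i, ⟨hi, hin⟩, Or.inr ⟨⟨rfl, hz.symm⟩, ?_⟩⟩))
          rw [← hz]; exact hv
        · exact Or.inl (Or.inr ⟨i, ⟨hi, hin⟩, j, ⟨hj, by omega⟩, Ne.symm h,
            Or.inl ⟨⟨rfl, rfl⟩, hv⟩⟩)
  · rintro (((⟨c, ⟨hc0, hcm⟩, (⟨⟨rfl, rfl⟩, hne⟩ | ⟨⟨eh, rfl⟩, hne⟩)⟩ |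
        ⟨r, ⟨hr0, hrn⟩, (⟨⟨rfl, rfl⟩, hne⟩ | ⟨⟨rfl, ej⟩, hne⟩)⟩) |
        ⟨r, ⟨hr0, hrn⟩, x1, ⟨hx0, hx1m⟩, hdiff, (⟨⟨rfl, rfl⟩, hne⟩ | ⟨⟨rfl, ej⟩, hne⟩)⟩) |
        ⟨r, ⟨hr0, hrn⟩, x1, ⟨hx0, hx1m⟩, hdiff, (⟨⟨rfl, rfl⟩, hne⟩ | ⟨⟨er, rfl⟩, hne⟩)⟩)
    · exact ⟨hne, Or.inl (Or.inl (Or.inl (Or.inl (Or.inl (by omega)))))⟩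
    · subst eh
      exact ⟨hne, Or.inr (Or.inl (Or.inl (Or.inl (Or.inl (Or.inr (by omega))))))⟩
    · exact ⟨hne, Or.inr (Or.inr (Or.inl (Or.inl (Or.inl (Or.inr (by omega))))))⟩
    · subst ej
      exact ⟨hne, Or.inr (Or.inr (Or.inr (Or.inl (Or.inr (by omega)))))⟩
    · exact ⟨hne, Or.inr (Or.inr (Or.inr (Or.inr (Ne.symm hdiff))))⟩
    · subst ej
      refine ⟨hne, Or.inr (Or.inr (Or.inl (Or.inr ?_)))⟩
      rw [show x1 + 1 - 1 = x1 from by omega]; exact hdiff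
    · exact ⟨hne, Or.inr (Or.inl (Or.inr (Ne.symm hdiff)))⟩
    · subst er
      refine ⟨hne, Or.inl (Or.inr ?_)⟩
      rw [show r + 1 - 1 = r from by omega]; exact hdiff

lemma pvCell_getElem (res : List (List Int)) (k l : Nat)
    (h1 : k < res.length) (h2 : l < (res[k]'h1).length) :
    (res[k]'h1)[l]'h2 = pvCell res (k : Int) (l : Int) := by
  rw [pvCell_eq res _ _ (Int.natCast_nonneg k) (Int.natCast_nonneg l)]
  have e1 : ((k : Int)).toNat = k := by omega
  have e2 : ((l : Int)).toNat = l := by omega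
  rw [e1, e2, List.getD_eq_getElem _ _ h1, List.getD_eq_getElem _ _ h2]

-- ===== VERDICT (by name: the statement is the Claim_ definition above) =====
theorem p_outline_spec : Claim_equal_p_outline := by
  intro grid hdom hpre
  obtain ⟨hne, hrows⟩ := hpre
  unfold Spec_p_outline
  obtain ⟨hAsh, hAcell⟩ := charA grid hne
  obtain ⟨hBsh, hBcell⟩ := charB grid hne
  have hn0 : 0 < grid.length := List.length_pos_iff.mpr hne
  apply List.ext_getElem (by rw [hAsh.1, hBsh.1])
  intro k h1 h2
  have hk : k < grid.length := by rw [← hAsh.1]; exact h1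
  have hrA : ((p_outline grid)[k]'h1).length = (PySem.List.pyGetD grid 0 []).length :=
    hAsh.2 _ (List.getElem_mem h1)
  have hrB : ((p_outline_alt grid)[k]'h2).length = (PySem.List.pyGetD grid 0 []).length :=
    hBsh.2 _ (List.getElem_mem h2)
  apply List.ext_getElem (by rw [hrA, hrB])
  intro l hl1 hl2
  have hlm : l < (PySem.List.pyGetD grid 0 []).length := by rw [← hrA]; exact hl1
  rw [pvCell_getElem _ _ _ h1 hl1, pvCell_getElem _ _ _ h2 hl2,
    hAcell _ _ (Int.natCast_nonneg k) (by exact_mod_cast hk) (Int.natCast_nonneg l)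
      (by exact_mod_cast hlm),
    hBcell _ _ (Int.natCast_nonneg k) (by exact_mod_cast hk) (Int.natCast_nonneg l)
      (by exact_mod_cast hlm),
    pvCond_eq grid (pvBg grid) _ _ _ _ (by omega) (by omega) (Int.natCast_nonneg k)
      (by exact_mod_cast hk) (Int.natCast_nonneg l) (by exact_mod_cast hlm)]
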